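-- pv_equiv track=rewrite | github.com/Andyporras/Recursion_cola | partirLista 13-4-2021.py | partirLista2_aux
-- ===== SOURCE A (Python) =====
-- def partirLista2_aux(lista,sublista,sublista2,result):
--     if(lista==[]):
--         return result+[sublista]+[sublista2]
--     elif(lista[0]>0):
--         suma=lista[0]
--         return partirLista2_aux(lista[1:],sublista+[suma],sublista2,result)
--     else:
--         return partirLista2_aux(lista[1:],[],sublista2+[lista[0]],result+[sublista])
-- ===== SOURCE B (Python) =====
-- def _span_pos(lista):
--     # longest all-positive prefix and the remainder
--     grp = []
--     i = 0
--     while i < len(lista) and lista[i] > 0: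
--         grp.append(lista[i])
--         i += 1
--     return grp, lista[i:]
--
-- def partirLista2_aux(lista, sublista, sublista2, result):
--     grp, rest = _span_pos(lista)
--     if not rest:
--         return result + [sublista + lista] + [sublista2]
--     return partirLista2_aux(rest[1:], [], sublista2 + [rest[0]],
--                             result + [sublista + grp])
-- ===== Notes on version B (the rewrite author's own statement) =====
-- stated objective: alternative
-- what changed: B recurses once per separator, peeling the whole positive prefix off with a span helper and appending it as a block, instead of A's element-by-element tail recursion threading the partial group through the accumulator.
import Mathlib
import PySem

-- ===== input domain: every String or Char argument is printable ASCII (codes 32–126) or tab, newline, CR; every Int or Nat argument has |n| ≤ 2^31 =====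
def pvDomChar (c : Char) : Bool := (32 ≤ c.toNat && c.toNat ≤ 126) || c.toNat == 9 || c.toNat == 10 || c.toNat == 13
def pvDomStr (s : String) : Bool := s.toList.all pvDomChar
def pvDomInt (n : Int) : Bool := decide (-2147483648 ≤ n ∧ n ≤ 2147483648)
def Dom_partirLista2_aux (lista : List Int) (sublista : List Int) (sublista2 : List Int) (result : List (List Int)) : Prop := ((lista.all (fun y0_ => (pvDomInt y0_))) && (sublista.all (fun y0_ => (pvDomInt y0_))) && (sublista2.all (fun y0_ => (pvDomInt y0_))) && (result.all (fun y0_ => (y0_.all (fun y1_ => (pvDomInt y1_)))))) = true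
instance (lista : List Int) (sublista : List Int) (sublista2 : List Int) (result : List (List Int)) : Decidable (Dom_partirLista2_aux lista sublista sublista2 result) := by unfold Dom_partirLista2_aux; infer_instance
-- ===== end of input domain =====

-- B recurses once per separator, peeling the whole positive prefix off with a span helper,
-- instead of A's element-by-element tail recursion; equal return value, different decomposition.

-- ===== PORT A =====
def partirLista2_aux (lista : List Int) (sublista : List Int) (sublista2 : List Int) (result : List (List Int)) : List (List Int) :=
  match lista with
  | [] => result ++ [sublista] ++ [sublista2]
  | x :: rest =>
    if x > 0 then
      let suma := x
      partirLista2_aux rest (sublista ++ [suma]) sublista2 result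
    else
      partirLista2_aux rest [] (sublista2 ++ [x]) (result ++ [sublista])

-- ===== PORT B =====
-- _span_pos: longest all-positive prefix and the remainder
def pvSpanPos (lista : List Int) : List Int × List Int :=
  match lista with
  | [] => ([], [])
  | x :: t => if x > 0 then let r := pvSpanPos t; (x :: r.1, r.2) else ([], x :: t)

theorem pvSpanPos_snd_length_le (lista : List Int) : (pvSpanPos lista).2.length ≤ lista.length := by
  induction lista with
  | nil => simp [pvSpanPos]
  | cons x t ih =>
    simp only [pvSpanPos]
    split <;> simp <;> omega

def partirLista2_aux_alt (lista : List Int) (sublista : List Int) (sublista2 : List Int) (result : List (List Int)) : List (List Int) :=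
  let sp := pvSpanPos lista
  match h : sp.2 with
  | [] => result ++ [sublista ++ lista] ++ [sublista2]
  | x :: tail =>
    partirLista2_aux_alt tail [] (sublista2 ++ [x]) (result ++ [sublista ++ sp.1])
termination_by lista.length
decreasing_by
  have := pvSpanPos_snd_length_le lista
  simp only [sp] at h
  rw [h] at this
  simp at this
  omega

-- ===== PRECONDITION & SPEC =====
def Spec_partirLista2_aux (lista : List Int) (sublista : List Int) (sublista2 : List Int) (result : List (List Int)) (out : List (List Int)) : Prop := out = partirLista2_aux_alt lista sublista sublista2 result
instance (lista : List Int) (sublista : List Int) (sublista2 : List Int) (result : List (List Int)) (out : List (List Int)) : Decidable (Spec_partirLista2_aux lista sublista sublista2 result out) := by unfold Spec_partirLista2_aux; infer_instance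

-- ===== CLAIM (what is proved, stated in full; the proofs are below) =====
def Claim_equal_partirLista2_aux : Prop := ∀ (lista : List Int) (sublista : List Int) (sublista2 : List Int) (result : List (List Int)), Dom_partirLista2_aux lista sublista sublista2 result → Spec_partirLista2_aux lista sublista sublista2 result (partirLista2_aux lista sublista sublista2 result)

-- ===== LEMMAS AND PROOFS =====

theorem alt_unfold (lista sublista sublista2 : List Int) (result : List (List Int)) :
    partirLista2_aux_alt lista sublista sublista2 result =
      match (pvSpanPos lista).2 with
      | [] => result ++ [sublista ++ lista] ++ [sublista2]
      | x :: tail => partirLista2_aux_alt tail [] (sublista2 ++ [x]) (result ++ [sublista ++ (pvSpanPos lista).1]) := by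
  conv_lhs => rw [partirLista2_aux_alt]
  split
  · next h => rw [h]
  · next h => rw [h]

theorem alt_eq_a (lista sublista sublista2 : List Int) (result : List (List Int)) :
    partirLista2_aux lista sublista sublista2 result = partirLista2_aux_alt lista sublista sublista2 result := by
  induction lista generalizing sublista sublista2 result with
  | nil => simp [partirLista2_aux, alt_unfold, pvSpanPos]
  | cons x t ih =>
    by_cases hx : x > 0
    · rw [partirLista2_aux]
      simp only [hx, if_pos]
      rw [ih, alt_unfold, alt_unfold]
      rcases hsp : pvSpanPos t with ⟨g, r⟩
      simp only [pvSpanPos, hx, if_pos, hsp]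
      cases r with
      | nil => simp
      | cons y tail => simp
    · rw [partirLista2_aux]
      simp only [hx, ite_false]
      rw [ih]
      conv_rhs => rw [alt_unfold]
      simp only [pvSpanPos, hx, ite_false]
      simp

-- ===== VERDICT (by name: the statement is the Claim_ definition above) =====
theorem partirLista2_aux_spec : Claim_equal_partirLista2_aux := by
  intro lista sublista sublista2 result _
  exact alt_eq_a lista sublista sublista2 result
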